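-- pv_equiv track=rewrite | github.com/osm-fr/bano | place_2_db_2.py | format_toponyme
-- ===== SOURCE A (Python) =====
-- def format_toponyme(s):
-- 	a_s = s.replace('\'',' ').split(' ')
--
-- 	# a_s = s.split('\'')
-- 	# a_s = [a[0:-1]+a[-1].lower() for a in a_s]
--
-- 	# Accents
-- 	dic_replace_accents = {}
-- 	dic_replace_accents['DERRIERE'] = u'DERRIÈRE'
-- 	dic_replace_accents['EGLISE'] = u'ÉGLISE'
-- 	dic_replace_accents['ILE'] = u'ÎLE'
-- 	dic_replace_accents['ILOT'] = u'ÎLOT'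
-- 	dic_replace_accents['PRE'] = u'PRÉ'
--
-- 	for m in range(0,len(a_s)):
-- 		if a_s[m] in dic_replace_accents:
-- 			a_s[m] = dic_replace_accents[a_s[m]]
--
-- 	# Capitalisation
-- 	a_s = [a.capitalize() for a in a_s]
--
-- 	# Minuscules
-- 	dic_replace_hors_premier_mot = {}
-- 	dic_replace_hors_premier_mot['Au'] = 'au'
-- 	dic_replace_hors_premier_mot['Aux'] = 'aux'
-- 	dic_replace_hors_premier_mot['D'] = 'd\''
-- 	dic_replace_hors_premier_mot['De'] = 'de'
-- 	dic_replace_hors_premier_mot['Des'] = 'des'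
-- 	dic_replace_hors_premier_mot['Du'] = 'du'
-- 	dic_replace_hors_premier_mot['Et'] = 'et'
-- 	dic_replace_hors_premier_mot['L'] = 'l\''
-- 	dic_replace_hors_premier_mot['La'] = 'la'
-- 	dic_replace_hors_premier_mot['Le'] = 'le'
-- 	dic_replace_hors_premier_mot['Les'] = 'les'
-- 	dic_replace_hors_premier_mot['Un'] = 'un'
-- 	dic_replace_hors_premier_mot['Une'] = 'une'
--
-- 	if len(a_s) > 1:
-- 		for m in range(1,len(a_s)):
-- 			if a_s[m] in dic_replace_hors_premier_mot:
-- 				a_s[m] = dic_replace_hors_premier_mot[a_s[m]]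
--
-- 	# Appostrophes
-- 	dic_ajoute_apostrophe = {}
-- 	dic_ajoute_apostrophe['d'] = 'd\''
-- 	dic_ajoute_apostrophe['D'] = 'D\''
-- 	dic_ajoute_apostrophe['l'] = 'l\''
-- 	dic_ajoute_apostrophe['L'] = 'L\''
--
-- 	for m in range(0,len(a_s)):
-- 		if a_s[m] in dic_ajoute_apostrophe:
-- 			a_s[m] = dic_ajoute_apostrophe[a_s[m]]
--
-- 	s = ' '.join(a_s).replace('\' ','\'\'')
-- 	if s.strip()[-1] == '\'':
-- 		s = s.strip()[0:-1]
-- 	return s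
-- ===== SOURCE B (Python) =====
-- # Different decomposition: one recursive descent builds the final string directly,
-- # transforming each word on the way and fusing the "' " -> "''" replace into the
-- # join (separator choice), so no rewritten word list and no replace pass exist.
--
-- def _transform(m, w):
--     # accent words, pre-composed with capitalize
--     if w == 'DERRIERE': w = u'Derri\u00e8re'
--     elif w == 'EGLISE': w = u'\u00c9glise'
--     elif w == 'ILE': w = u'\u00cele'
--     elif w == 'ILOT': w = u'\u00celot'
--     elif w == 'PRE': w = u'Pr\u00e9'
--     else: w = w.capitalize()
--     if m > 0:
--         if w in ('Au', 'Aux', 'De', 'Des', 'Du', 'Et', 'La', 'Le', 'Les', 'Un', 'Une'):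
--             w = w.lower()
--         elif w == 'D':
--             w = "d'"
--         elif w == 'L':
--             w = "l'"
--     if w == 'd': w = "d'"
--     elif w == 'l': w = "l'"
--     elif w == 'D': w = "D'"
--     elif w == 'L': w = "L'"
--     return w
--
-- def _build(words, m):
--     w = _transform(m, words[m])
--     if m == len(words) - 1:
--         return w
--     sep = "'" if w.endswith("'") else " "
--     return w + sep + _build(words, m + 1)
--
-- def format_toponyme(s):
--     s = _build(s.replace("'", " ").split(" "), 0)
--     t = s.strip()
--     return t[:-1] if t[-1] == "'" else s
-- ===== Notes on version B (the rewrite author's own statement) =====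
-- stated objective: alternative
-- what changed: A rewrites the word list in four staged passes (accent dict, capitalize, hors-premier-mot dict, apostrophe dict), joins it and runs a global "' "->"''" replace; B is one recursive descent over the words that transforms each word once and concatenates the output directly, fusing the replace into the choice of separator (an apostrophe after a word ending in one), so no rewritten list, no join and no replace pass exist.
import Mathlib
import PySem

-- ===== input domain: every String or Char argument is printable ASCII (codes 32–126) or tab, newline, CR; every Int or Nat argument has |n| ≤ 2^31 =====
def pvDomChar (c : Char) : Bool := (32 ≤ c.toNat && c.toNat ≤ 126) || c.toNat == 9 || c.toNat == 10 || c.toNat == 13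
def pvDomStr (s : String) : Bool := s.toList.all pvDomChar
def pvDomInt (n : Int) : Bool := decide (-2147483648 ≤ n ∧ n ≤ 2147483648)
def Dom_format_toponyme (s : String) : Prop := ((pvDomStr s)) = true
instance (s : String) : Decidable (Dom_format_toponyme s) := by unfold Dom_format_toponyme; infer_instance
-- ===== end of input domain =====

-- B replaces A's staged word-list rewriting (three dict passes + capitalize pass,
-- then join + a global "' "→"''" replace) by one recursive descent that transforms
-- each word once and builds the final string directly, fusing the replace into the
-- choice of separator; the final strip/trailing-quote cleanup is unchanged.

-- Python str.capitalize(): first char uppercased, rest lowercased; hand-ported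
-- (PySem has no capitalize). Exact for ASCII and for the accented chars È É Î
-- produced by this program (added by hand).
def pyLowerChar (c : Char) : Char :=
  if c = 'È' then 'è' else if c = 'É' then 'é' else if c = 'Î' then 'î'
  else PySem.Chars.lowerChar c

def capC (w : List Char) : List Char :=
  match w with
  | [] => []
  | c :: cs => PySem.Chars.upperChar c :: cs.map pyLowerChar

-- ===== PORT A =====
def dicAccents : PySem.Dict (List Char) (List Char) :=
  ((((PySem.Dict.empty.insert "DERRIERE".toList "DERRIÈRE".toList).insert
      "EGLISE".toList "ÉGLISE".toList).insert "ILE".toList "ÎLE".toList).insert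
      "ILOT".toList "ÎLOT".toList).insert "PRE".toList "PRÉ".toList

def dicHors : PySem.Dict (List Char) (List Char) :=
  ((((((((((((PySem.Dict.empty.insert "Au".toList "au".toList).insert "Aux".toList "aux".toList).insert
      "D".toList "d'".toList).insert "De".toList "de".toList).insert "Des".toList "des".toList).insert
      "Du".toList "du".toList).insert "Et".toList "et".toList).insert "L".toList "l'".toList).insert
      "La".toList "la".toList).insert "Le".toList "le".toList).insert "Les".toList "les".toList).insert
      "Un".toList "un".toList).insert "Une".toList "une".toList

def dicApo : PySem.Dict (List Char) (List Char) :=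
  (((PySem.Dict.empty.insert "d".toList "d'".toList).insert "D".toList "D'".toList).insert
      "l".toList "l'".toList).insert "L".toList "L'".toList

-- the three loop bodies of A: `if a_s[m] in dic: a_s[m] = dic[a_s[m]]`
def accStepA (a : List Char) : List Char :=
  match dicAccents.get? a with | some v => v | none => a
def horsStepA (m : Nat) (a : List Char) : List Char :=
  if 1 ≤ m then (match dicHors.get? a with | some v => v | none => a) else a
def apoStepA (a : List Char) : List Char :=
  match dicApo.get? a with | some v => v | none => a

def format_toponyme (s : String) : String :=
  -- a_s = s.replace('\'',' ').split(' ')   (sep ≠ "": Chars.splitOn is exactly this split)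
  let a_s := PySem.Chars.splitOn (PySem.Chars.replace s.toList ['\''] [' ']) [' ']
  -- for m in range(0,len(a_s)): accent lookup, rewriting each element in place
  let a_s := a_s.map accStepA
  -- a_s = [a.capitalize() for a in a_s]
  let a_s := a_s.map capC
  -- if len(a_s) > 1: for m in range(1,len(a_s)): hors-premier-mot lookup
  let a_s := if a_s.length > 1 then a_s.mapIdx horsStepA else a_s
  -- for m in range(0,len(a_s)): apostrophe lookup
  let a_s := a_s.map apoStepA
  -- s = ' '.join(a_s).replace('\' ','\'\'')
  let j := PySem.Chars.replace (PySem.Chars.join [' '] a_s) ['\'', ' '] ['\'', '\'']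
  -- if s.strip()[-1] == '\'': s = s.strip()[0:-1]
  match PySem.List.pyGet? (PySem.Chars.strip j) (-1) with
  | some c => if c = '\'' then String.ofList (PySem.Chars.slice (PySem.Chars.strip j) (some 0) (some (-1)))
              else String.ofList j
  | none => String.ofList j   -- Python raises IndexError here; excluded by Pre_

-- ===== PORT B =====
-- the three sequential stages of Source B's _transform
def accCapB (w : List Char) : List Char :=
  if w = "DERRIERE".toList then "Derrière".toList
  else if w = "EGLISE".toList then "Église".toList
  else if w = "ILE".toList then "Île".toList
  else if w = "ILOT".toList then "Îlot".toList
  else if w = "PRE".toList then "Pré".toList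
  else capC w

def horsB (m : Nat) (w : List Char) : List Char :=
  if 0 < m then
    (if w = "Au".toList ∨ w = "Aux".toList ∨ w = "De".toList ∨ w = "Des".toList ∨
        w = "Du".toList ∨ w = "Et".toList ∨ w = "La".toList ∨ w = "Le".toList ∨
        w = "Les".toList ∨ w = "Un".toList ∨ w = "Une".toList then PySem.Chars.lower w
     else if w = "D".toList then "d'".toList
     else if w = "L".toList then "l'".toList
     else w)
  else w

def apoB (w : List Char) : List Char :=
  if w = "d".toList then "d'".toList
  else if w = "l".toList then "l'".toList
  else if w = "D".toList then "D'".toList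
  else if w = "L".toList then "L'".toList
  else w

def transformB (m : Nat) (w : List Char) : List Char := apoB (horsB m (accCapB w))

-- _build(words, m): transform the word, stop at the last one, otherwise pick the
-- separator ("'" after a word ending in "'", fusing the "' "→"''" replace) and recurse
def buildB : Nat → List (List Char) → List Char
  | _, [] => []
  | m, [w] => transformB m w
  | m, w :: w2 :: rest =>
      let tw := transformB m w
      tw ++ ((if PySem.Chars.endswith tw ['\''] then '\'' else ' ') :: buildB (m+1) (w2 :: rest))

def format_toponyme_alt (s : String) : String :=
  let s2 := buildB 0 (PySem.Chars.splitOn (PySem.Chars.replace s.toList ['\''] [' ']) [' '])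
  let t := PySem.Chars.strip s2
  match PySem.List.pyGet? t (-1) with
  | some c => if c = '\'' then String.ofList (PySem.Chars.slice t none (some (-1)))
              else String.ofList s2
  | none => String.ofList s2

-- ===== PRECONDITION & SPEC =====
-- A raises IndexError (s.strip()[-1] on an empty string) exactly when every character
-- of s is a space, apostrophe, tab, newline or CR; Pre_ excludes those inputs.
def Pre_format_toponyme (s : String) : Prop :=
  (s.toList.any (fun c => !(c == ' ' || c == '\'' || c == '\t' || c == '\n' || c == '\r'))) = true
instance (s : String) : Decidable (Pre_format_toponyme s) := by
  unfold Pre_format_toponyme; infer_instance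

def pvWitness_format_toponyme : String := "X"

def Spec_format_toponyme (s : String) (out : String) : Prop := out = format_toponyme_alt s
instance (s : String) (out : String) : Decidable (Spec_format_toponyme s out) := by
  unfold Spec_format_toponyme; infer_instance

-- ===== CLAIM (what is proved, stated in full; the proofs are below) =====
def Claim_equal_format_toponyme : Prop :=
  ∀ (s : String), Dom_format_toponyme s → Pre_format_toponyme s →
    Spec_format_toponyme s (format_toponyme s)

-- ===== LEMMAS AND PROOFS =====

-- Python's non-overlapping left-to-right replace, specialised to "' " → "''"
def repQ : List Char → List Char
  | [] => []
  | [c] => [c]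
  | c :: c2 :: t =>
      if c = '\'' ∧ c2 = ' ' then '\'' :: '\'' :: repQ t else c :: repQ (c2 :: t)

lemma repQ_go (fuel : Nat) : ∀ (l acc : List Char), l.length ≤ fuel →
    PySem.Chars.replace.go ['\'', ' '] ['\'', '\''] fuel l acc = acc.reverse ++ repQ l := by
  induction fuel with
  | zero =>
    intro l acc h
    have hl : l = [] := List.eq_nil_of_length_eq_zero (Nat.le_zero.mp h)
    subst hl
    rw [PySem.Chars.replace.go]; simp [repQ]
  | succ fuel ih =>
    intro l acc h
    match l with
    | [] =>
      rw [PySem.Chars.replace.go]; simp [repQ]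
      omega
    | [c] =>
      rw [PySem.Chars.replace.go]
      rw [if_neg (by simp [List.isPrefixOf])]
      rw [ih [] (c :: acc) (by simp)]
      simp [repQ]
    | c :: c2 :: t =>
      rw [PySem.Chars.replace.go]
      by_cases hc : c = '\'' ∧ c2 = ' '
      · obtain ⟨rfl, rfl⟩ := hc
        rw [if_pos (by simp [List.isPrefixOf])]
        have ht : t.length ≤ fuel := by simp at h; omega
        rw [show List.drop (['\'', ' '] : List Char).length ('\'' :: ' ' :: t) = t from rfl]
        rw [ih t _ ht]
        simp [repQ]
      · rw [if_neg (by
          simp only [List.isPrefixOf, Bool.and_true,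
            Bool.and_eq_true, beq_iff_eq]
          rintro ⟨rfl, rfl⟩
          exact hc ⟨rfl, rfl⟩)]
        have ht : (c2 :: t).length ≤ fuel := by simp at h ⊢; omega
        rw [ih (c2 :: t) (c :: acc) ht]
        simp [repQ, hc]

lemma replace_eq_repQ (l : List Char) :
    PySem.Chars.replace l ['\'', ' '] ['\'', '\''] = repQ l := by
  rw [PySem.Chars.replace]
  rw [if_neg (by simp)]
  rw [repQ_go l.length l [] le_rfl]
  simp

-- words produced by split(' ') contain no space
lemma splitOn_go_nospace (fuel : Nat) : ∀ (l cur : List Char) (acc : List (List Char)),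
    l.length < fuel → (' ' ∉ cur) → (∀ w ∈ acc, ' ' ∉ w) →
    ∀ w ∈ PySem.Chars.splitOn.go [' '] fuel l cur acc, ' ' ∉ w := by
  induction fuel with
  | zero => intro l cur acc h; omega
  | succ fuel ih =>
    intro l cur acc h hcur hacc
    match l with
    | [] =>
      rw [PySem.Chars.splitOn.go]
      case _ =>
        intro w hw
        simp only [List.mem_reverse, List.mem_cons] at hw
        rcases hw with hw | hw
        · subst hw; simpa using hcur
        · exact hacc w hw
      case _ => omega
    | c :: t =>
      rw [PySem.Chars.splitOn.go]
      by_cases hc : c = ' '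
      · subst hc
        rw [if_pos (by simp [List.isPrefixOf])]
        exact ih t [] (cur.reverse :: acc) (by simp at h ⊢; omega) (by simp)
          (by intro w hw
              rcases List.mem_cons.mp hw with hw | hw
              · subst hw; simpa using hcur
              · exact hacc w hw)
      · rw [if_neg (by
          simp only [List.isPrefixOf, Bool.and_true, beq_iff_eq]
          exact fun he => hc he.symm)]
        exact ih t (c :: cur) acc (by simp at h ⊢; omega)
          (by intro hw
              rcases List.mem_cons.mp hw with hw | hw
              · exact hc hw.symm
              · exact hcur hw)
          hacc

lemma splitOn_nospace (l : List Char) : ∀ w ∈ PySem.Chars.splitOn l [' '], ' ' ∉ w := by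
  rw [PySem.Chars.splitOn]
  exact splitOn_go_nospace (l.length + 1) l [] [] (by omega) (by simp) (by simp)

-- character-level: upper/lowercasing never creates a space
lemma upperChar_ne_space {c : Char} (h : c ≠ ' ') : PySem.Chars.upperChar c ≠ ' ' := by
  unfold PySem.Chars.upperChar PySem.Chars.islower
  split_ifs with hl
  · intro he
    simp only [Bool.and_eq_true, decide_eq_true_eq, Char.le_def, UInt32.le_iff_toNat_le] at hl
    have h1 : 97 ≤ c.toNat := hl.1
    have h2 : c.toNat ≤ 122 := hl.2
    have hv : (c.toNat - 32).isValidChar := by unfold Nat.isValidChar; left; omega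
    have ht : (Char.ofNat (c.toNat - 32)).toNat = c.toNat - 32 := by
      rw [Char.toNat_ofNat, if_pos hv]
    rw [he] at ht
    have hs : (' ' : Char).toNat = 32 := by decide
    omega
  · exact h

lemma lowerChar_ne_space {c : Char} (h : c ≠ ' ') : PySem.Chars.lowerChar c ≠ ' ' := by
  unfold PySem.Chars.lowerChar PySem.Chars.isupper
  split_ifs with hl
  · intro he
    simp only [Bool.and_eq_true, decide_eq_true_eq, Char.le_def, UInt32.le_iff_toNat_le] at hl
    have h1 : 65 ≤ c.toNat := hl.1
    have h2 : c.toNat ≤ 90 := hl.2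
    have hv : (c.toNat + 32).isValidChar := by unfold Nat.isValidChar; left; omega
    have ht : (Char.ofNat (c.toNat + 32)).toNat = c.toNat + 32 := by
      rw [Char.toNat_ofNat, if_pos hv]
    rw [he] at ht
    have hs : (' ' : Char).toNat = 32 := by decide
    omega
  · exact h

lemma pyLowerChar_ne_space {c : Char} (h : c ≠ ' ') : pyLowerChar c ≠ ' ' := by
  unfold pyLowerChar
  split_ifs <;> first | decide | exact lowerChar_ne_space h

lemma capC_nospace {w : List Char} (h : ' ' ∉ w) : ' ' ∉ capC w := by
  match w with
  | [] => simp [capC]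
  | c :: cs =>
    intro hmem
    simp only [capC, List.mem_cons, List.mem_map] at hmem
    have hc : c ≠ ' ' := fun e => h (by simp [e])
    rcases hmem with he | ⟨x, hx, he⟩
    · exact upperChar_ne_space hc he.symm
    · have hx' : x ≠ ' ' := fun e => h (List.mem_cons_of_mem c (e ▸ hx))
      exact pyLowerChar_ne_space hx' he

lemma lower_nospace {w : List Char} (h : ' ' ∉ w) : ' ' ∉ PySem.Chars.lower w := by
  simp only [PySem.Chars.lower, List.mem_map, not_exists, not_and]
  intro x hx he
  exact lowerChar_ne_space (fun hc => h (hc ▸ hx)) he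

lemma transformB_nospace (m : Nat) {w : List Char} (h : ' ' ∉ w) : ' ' ∉ transformB m w := by
  have h1 : ' ' ∉ accCapB w := by
    unfold accCapB
    split_ifs <;> first | decide | exact capC_nospace h
  have h2 : ' ' ∉ horsB m (accCapB w) := by
    unfold horsB
    split_ifs <;> first | decide | exact lower_nospace h1 | exact h1
  unfold transformB apoB
  split_ifs <;> first | decide | exact h2

-- A's per-word passes composed at index m = B's single transformation
lemma hors_eq (a : List Char) :
    (match dicHors.get? a with | some v => v | none => a) =
    (if a = "Au".toList ∨ a = "Aux".toList ∨ a = "De".toList ∨ a = "Des".toList ∨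
        a = "Du".toList ∨ a = "Et".toList ∨ a = "La".toList ∨ a = "Le".toList ∨
        a = "Les".toList ∨ a = "Un".toList ∨ a = "Une".toList then PySem.Chars.lower a
     else if a = "D".toList then "d'".toList
     else if a = "L".toList then "l'".toList
     else a) := by
  by_cases h1 : a = ['A','u']; · subst h1; decide
  by_cases h2 : a = ['A','u','x']; · subst h2; decide
  by_cases h3 : a = ['D']; · subst h3; decide
  by_cases h4 : a = ['D','e']; · subst h4; decide
  by_cases h5 : a = ['D','e','s']; · subst h5; decide
  by_cases h6 : a = ['D','u']; · subst h6; decide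
  by_cases h7 : a = ['E','t']; · subst h7; decide
  by_cases h8 : a = ['L']; · subst h8; decide
  by_cases h9 : a = ['L','a']; · subst h9; decide
  by_cases h10 : a = ['L','e']; · subst h10; decide
  by_cases h11 : a = ['L','e','s']; · subst h11; decide
  by_cases h12 : a = ['U','n']; · subst h12; decide
  by_cases h13 : a = ['U','n','e']; · subst h13; decide
  simp [dicHors, PySem.Dict.get?_insert, PySem.Dict.get?_empty,
    h1, h2, h3, h4, h5, h6, h7, h8, h9, h10, h11, h12, h13]

lemma apo_eq (a : List Char) : apoStepA a = apoB a := by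
  by_cases h1 : a = ['d']; · subst h1; decide
  by_cases h2 : a = ['l']; · subst h2; decide
  by_cases h3 : a = ['D']; · subst h3; decide
  by_cases h4 : a = ['L']; · subst h4; decide
  simp [apoStepA, apoB, dicApo, PySem.Dict.get?_insert, PySem.Dict.get?_empty, h1, h2, h3, h4]

lemma acc_cap_eq (w : List Char) : capC (accStepA w) = accCapB w := by
  by_cases h1 : w = ['D','E','R','R','I','E','R','E']; · subst h1; decide
  by_cases h2 : w = ['E','G','L','I','S','E']; · subst h2; decide
  by_cases h3 : w = ['I','L','E']; · subst h3; decide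
  by_cases h4 : w = ['I','L','O','T']; · subst h4; decide
  by_cases h5 : w = ['P','R','E']; · subst h5; decide
  simp [accStepA, accCapB, dicAccents, PySem.Dict.get?_insert, PySem.Dict.get?_empty,
    h1, h2, h3, h4, h5]

lemma hors_step_eq (m : Nat) (a : List Char) : horsStepA m a = horsB m a := by
  unfold horsStepA horsB
  by_cases hm : 0 < m
  · rw [if_pos hm, if_pos (show 1 ≤ m from hm), hors_eq]
  · rw [if_neg hm, if_neg (show ¬ 1 ≤ m from hm)]

lemma point_eq (m : Nat) (w : List Char) :
    apoStepA (horsStepA m (capC (accStepA w))) = transformB m w := by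
  rw [acc_cap_eq, hors_step_eq, apo_eq, transformB]

-- A's four per-word passes over the whole list
lemma words_eq (ws : List (List Char)) :
    (if ((ws.map accStepA).map capC).length > 1
      then ((ws.map accStepA).map capC).mapIdx horsStepA
      else (ws.map accStepA).map capC).map apoStepA =
    ws.mapIdx (fun i w => transformB i w) := by
  by_cases h : ((ws.map accStepA).map capC).length > 1
  · rw [if_pos h]
    apply List.ext_getElem
    · simp
    · intro i h1 h2
      simp [point_eq]
  · rw [if_neg h]
    simp only [List.length_map] at h
    match ws with
    | [] => rfl
    | [w] =>
      show [apoStepA (capC (accStepA w))] = [transformB 0 w]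
      rw [← point_eq 0 w]; rfl
    | _ :: _ :: _ => simp at h

-- ' '.join of the transformed words, written as B's recursion (without the separator fusion)
def joinT : Nat → List (List Char) → List Char
  | _, [] => []
  | m, [w] => transformB m w
  | m, w :: w2 :: rest => transformB m w ++ ' ' :: joinT (m+1) (w2 :: rest)

lemma join_mapIdx (ws : List (List Char)) : ∀ m : Nat,
    PySem.Chars.join [' '] (ws.mapIdx (fun i w => transformB (m + i) w)) = joinT m ws := by
  induction ws with
  | nil => intro m; simp [PySem.Chars.join, List.intercalate, joinT]
  | cons w rest ih =>
    intro m
    rw [List.mapIdx_cons]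
    match rest with
    | [] => simp [PySem.Chars.join, List.intercalate, joinT]
    | w2 :: rest2 =>
      have hfe : (fun i (a : List Char) => transformB (m + (i + 1)) a) =
          (fun i a => transformB (m + 1 + i) a) := by
        funext i a
        congr 1
        omega
      have hj : PySem.Chars.join [' '] ((w2 :: rest2).mapIdx (fun i a => transformB (m + 1 + i) a)) =
          joinT (m + 1) (w2 :: rest2) := ih (m + 1)
      show PySem.Chars.join [' ']
        (transformB (m + 0) w :: (w2 :: rest2).mapIdx (fun i a => transformB (m + (i + 1)) a)) = _
      rw [hfe]
      have hcons : ∀ (a b : List Char) (t : List (List Char)),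
          PySem.Chars.join [' '] (a :: b :: t) = a ++ ' ' :: PySem.Chars.join [' '] (b :: t) := by
        intro a b t
        simp [PySem.Chars.join, List.intercalate, List.intersperse]
      rcases hmi : (w2 :: rest2).mapIdx (fun i a => transformB (m + 1 + i) a) with _ | ⟨b, t⟩
      · simp at hmi
      · rw [hcons]
        rw [← hmi, hj]
        simp [joinT]

lemma repQ_space_cons (r : List Char) : repQ (' ' :: r) = ' ' :: repQ r := by
  match r with
  | [] => rfl
  | c :: t => simp [repQ]

lemma repQ_id {w : List Char} (h : ' ' ∉ w) : repQ w = w := by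
  match w with
  | [] => rfl
  | [c] => rfl
  | c :: c2 :: t =>
    have hc2 : c2 ≠ ' ' := fun he => h (by simp [he])
    rw [repQ, if_neg (fun hand => hc2 hand.2)]
    have ht : ' ' ∉ c2 :: t := fun hm => h (List.mem_cons_of_mem c hm)
    rw [repQ_id ht]

lemma repQ_boundary {w : List Char} (h : ' ' ∉ w) (r : List Char) :
    repQ (w ++ ' ' :: r) =
    w ++ (if w.getLast? = some '\'' then '\'' else ' ') :: repQ r := by
  match w with
  | [] => simpa using repQ_space_cons r
  | [c] =>
    have hc : c ≠ ' ' := fun e => h (by simp [e])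
    by_cases hq : c = '\''
    · subst hq; simp [repQ]
    · show repQ (c :: ' ' :: r) = _
      rw [repQ, if_neg (fun hand => hq hand.1), repQ_space_cons]
      simp [hq]
  | c :: c2 :: t =>
    have hc2 : c2 ≠ ' ' := fun he => h (by simp [he])
    have ht : ' ' ∉ c2 :: t := fun hm => h (List.mem_cons_of_mem c hm)
    have hb := repQ_boundary ht r
    rw [List.cons_append] at hb
    show repQ (c :: c2 :: (t ++ ' ' :: r)) = _
    rw [repQ, if_neg (fun hand => hc2 hand.2), hb]
    simp [List.getLast?_cons_cons]

lemma endswith_quote (tw : List Char) :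
    PySem.Chars.endswith tw ['\''] = decide (tw.getLast? = some '\'') := by
  by_cases h : tw.getLast? = some '\''
  · simp only [h, decide_true]
    rw [PySem.Chars.endswith, List.isSuffixOf_iff_suffix]
    exact ⟨tw.dropLast, List.dropLast_append_getLast? '\'' h⟩
  · simp only [h, decide_false]
    rw [PySem.Chars.endswith]
    rw [show (false : Bool) = decide False by decide]
    rw [Bool.eq_iff_iff]
    simp only [List.isSuffixOf_iff_suffix, decide_eq_true_eq, iff_false]
    rintro ⟨t, ht⟩
    exact h (ht ▸ List.getLast?_concat)

lemma repQ_joinT (ws : List (List Char)) : ∀ m : Nat, (∀ w ∈ ws, ' ' ∉ w) →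
    repQ (joinT m ws) = buildB m ws := by
  induction ws with
  | nil => intro m _; rfl
  | cons w rest ih =>
    intro m hns
    match rest with
    | [] =>
      show repQ (transformB m w) = transformB m w
      exact repQ_id (transformB_nospace m (hns w (by simp)))
    | w2 :: rest2 =>
      show repQ (transformB m w ++ ' ' :: joinT (m+1) (w2 :: rest2)) = _
      rw [repQ_boundary (transformB_nospace m (hns w (by simp))) _]
      rw [ih (m+1) (fun x hx => hns x (List.mem_cons_of_mem w hx))]
      show _ = transformB m w ++
        ((if PySem.Chars.endswith (transformB m w) ['\''] then '\'' else ' ') ::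
          buildB (m+1) (w2 :: rest2))
      rw [endswith_quote]
      by_cases hq : (transformB m w).getLast? = some '\'' <;> simp [hq]

lemma slice_none_zero (t : List Char) :
    PySem.Chars.slice t (some 0) (some (-1)) = PySem.Chars.slice t none (some (-1)) := by
  simp [PySem.Chars.slice_eq_listSlice, PySem.List.slice]

-- ===== VERDICT (by name: the statement is the Claim_ definition above) =====
theorem format_toponyme_spec : Claim_equal_format_toponyme := by
  intro s _ _
  unfold Spec_format_toponyme
  simp only [format_toponyme, format_toponyme_alt]
  rw [words_eq, replace_eq_repQ]
  have h0 : (PySem.Chars.splitOn (PySem.Chars.replace s.toList ['\''] [' ']) [' ']).mapIdx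
      (fun i w => transformB i w) =
      (PySem.Chars.splitOn (PySem.Chars.replace s.toList ['\''] [' ']) [' ']).mapIdx
      (fun i w => transformB (0 + i) w) := by simp
  rw [h0, join_mapIdx,
    repQ_joinT _ 0 (splitOn_nospace (PySem.Chars.replace s.toList ['\''] [' '])),
    slice_none_zero]
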